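-- pv_equiv track=rewrite | github.com/Adam0s007/DSA | graphs/bitAlgo-graphs/zad15LiteryRownowazne.py | rownowazne
-- ===== SOURCE A (Python) =====
-- class Node:
--     def __init__(self,value):
--         self.parent = self
--         self.value = value
--
-- def make(x):
--     return Node(x)
--
-- def find(x):
--     if x.parent != x:
--         x.parent = find(x.parent)
--     return x.parent
--
-- def union(x, y):
--     x = find(x)
--     y = find(y)
--     if x == y: return
--     if x.value < y.value: y.parent = x
--     else:
--         x.parent = y
--
-- def rownowazne(A,B,C):
--
--     count_chars = ord('z') - ord('a') + 1
--     visited = [False for i in range(count_chars)]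
--     sets = [make(chr(ord('a')+i)) for i in range(count_chars)] #dla wszystkich liter od a do z
--
--     for i in range(len(B)):
--         znB = ord(B[i]) - ord('a')
--         visited[znB] = True
--         znA = ord(A[i]) - ord('a')
--         visited[znA] = True
--         if find(sets[znA]) != find(sets[znB]):
--             union(sets[znA],sets[znB])
--
--     #zamieniamy wszystkie litery z c z literami rownowaznymi!
--     ans = ['' for i in range(len(C))]
--     for i in range(len(C)):
--         znC = ord(C[i]) - ord('a')
--         ans[i] = str(find(sets[znC]).parent.value)
--
--     return "".join(ans)
-- ===== SOURCE B (Python) =====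
-- def rownowazne(A, B, C):
--     L = "abcdefghijklmnopqrstuvwxyz"
--     edges = [(L.index(a), L.index(b)) for a, b in zip(A, B)]
--     lab = list(range(26))
--     changed = True
--     while changed:
--         changed = False
--         for i, j in edges:
--             m = min(lab[i], lab[j])
--             if lab[i] != m or lab[j] != m:
--                 lab[i] = lab[j] = m
--                 changed = True
--     return "".join(L[lab[L.index(c)]] for c in C)
-- ===== Notes on version B (the rewrite author's own statement) =====
-- stated objective: alternative
-- what changed: Replaces A's pointer-based union-find (path compression, union toward the smaller letter) by a single edge list over which a min-label array is propagated to a fixpoint, then C is rewritten through the resulting 26-entry label table.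
-- outside the precondition, e.g. on rownowazne('G', 'a', 'G'): A returns 'a', B raises ValueError; on rownowazne('`', '`', '`'): A returns 'z', B raises ValueError
import Mathlib
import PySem

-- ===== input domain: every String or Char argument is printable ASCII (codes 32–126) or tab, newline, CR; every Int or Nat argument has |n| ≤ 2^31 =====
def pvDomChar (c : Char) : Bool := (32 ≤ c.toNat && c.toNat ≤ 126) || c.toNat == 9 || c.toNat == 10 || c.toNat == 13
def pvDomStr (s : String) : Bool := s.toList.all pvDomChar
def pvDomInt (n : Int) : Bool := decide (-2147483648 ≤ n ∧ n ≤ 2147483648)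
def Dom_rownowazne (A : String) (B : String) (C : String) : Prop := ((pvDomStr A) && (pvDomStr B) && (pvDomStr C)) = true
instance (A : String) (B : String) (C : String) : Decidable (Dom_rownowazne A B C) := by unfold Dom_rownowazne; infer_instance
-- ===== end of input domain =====

-- B replaces A's pointer-based union-find (with path compression and union-to-smaller-letter)
-- by iterating a min-label propagation over the edge list to a fixpoint; objective: alternative
-- (same task, genuinely different algorithm; not measurably faster).

-- ===== PORT A =====
-- find(x) with path compression: parents are a 26-entry list of node indices; fuel bounds the
-- recursion depth (parent chains are strictly decreasing on every input A returns on).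
def ufFind : Nat → List Nat → Nat → List Nat × Nat
  | 0, p, x => (p, x)
  | f+1, p, x =>
    let px := p.getD x x
    if px = x then (p, x)
    else
      let r := ufFind f p px
      (r.1.set x r.2, r.2)

-- union(x, y): x.value < y.value (single lowercase letters) iff the node indices compare the same way.
def ufUnion (p : List Nat) (x y : Nat) : List Nat :=
  let f1 := ufFind 26 p x
  let f2 := ufFind 26 f1.1 y
  if f1.2 = f2.2 then f2.1
  else if f1.2 < f2.2 then f2.1.set f2.2 f1.2
  else f2.1.set f1.2 f2.2

-- the body 'if find(sets[znA]) != find(sets[znB]): union(sets[znA], sets[znB])' (object identity = node index)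
def ufStep (p : List Nat) (ia ib : Nat) : List Nat :=
  let f1 := ufFind 26 p ia
  let f2 := ufFind 26 f1.1 ib
  if f1.2 ≠ f2.2 then ufUnion f2.1 ia ib else f2.1

-- loop body of 'for i in range(len(B))' (state: (visited, parents))
def aStep (la lb : List Char) (st : List Bool × List Nat) (i : Nat) : List Bool × List Nat :=
  match PySem.List.pyGet? lb (i : Int) with
  | none => st                                                -- IndexError (unreachable: i < len(B))
  | some cb =>
    let znB : Int := (cb.toNat : Int) - 97
    match PySem.List.pySet? st.1 znB true with
    | none => st                                              -- IndexError on visited[znB]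
    | some vis1 =>
      match PySem.List.pyGet? la (i : Int) with
      | none => (vis1, st.2)                                  -- IndexError on A[i]
      | some ca =>
        let znA : Int := (ca.toNat : Int) - 97
        match PySem.List.pySet? vis1 znA true with
        | none => (vis1, st.2)                                -- IndexError on visited[znA]
        | some vis2 =>
          match PySem.List.pyGet? (List.range 26) znA, PySem.List.pyGet? (List.range 26) znB with
          | some ia, some ib => (vis2, ufStep st.2 ia ib)     -- sets[znA], sets[znB]
          | _, _ => (vis2, st.2)                              -- IndexError on sets[..]

-- loop body of the answer loop (state: (parents, ans))
def aOut (st : List Nat × List String) (c : Char) : List Nat × List String :=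
  let znC : Int := (c.toNat : Int) - 97
  match PySem.List.pyGet? (List.range 26) znC with
  | none => st                                               -- IndexError on sets[znC]
  | some ic =>
    let f := ufFind 26 st.1 ic
    (f.1, st.2 ++ [String.ofList [Char.ofNat (97 + f.2)]])       -- str(find(sets[znC]).parent.value)

def rownowazne (A : String) (B : String) (C : String) : String :=
  let la := A.toList
  let lb := B.toList
  let lc := C.toList
  -- visited = [False]*26, sets = [make(chr(97+i)) for i in range(26)] (node i ↔ letter chr(97+i))
  let st := (List.range lb.length).foldl (aStep la lb) (List.replicate 26 false, List.range 26)
  let fin := lc.foldl aOut (st.2, [])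
  PySem.Str.join "" fin.2

-- ===== PORT B =====
def lettersL : List Char := "abcdefghijklmnopqrstuvwxyz".toList

-- one 'for i, j in edges' pass; state = (lab, changed)
def labPass (edges : List (Nat × Nat)) (lab : List Nat) : List Nat × Bool :=
  edges.foldl (fun (st : List Nat × Bool) (e : Nat × Nat) =>
    let m := min (st.1.getD e.1 0) (st.1.getD e.2 0)
    if st.1.getD e.1 0 ≠ m ∨ st.1.getD e.2 0 ≠ m then ((st.1.set e.1 m).set e.2 m, true)
    else st) (lab, false)

-- 'while changed:' — fuel 327 suffices: each changed pass strictly decreases sum(lab) ≤ 325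
def labLoop : Nat → List (Nat × Nat) → List Nat → List Nat
  | 0, _, lab => lab
  | f+1, edges, lab =>
    let r := labPass edges lab
    if r.2 then labLoop f edges r.1 else lab

def rownowazne_alt (A : String) (B : String) (C : String) : String :=
  let edges := (A.toList.zip B.toList).map (fun ab =>
    ((PySem.List.index? lettersL ab.1).getD 26, (PySem.List.index? lettersL ab.2).getD 26))
  let lab := labLoop 327 edges (List.range 26)
  PySem.Str.join "" (C.toList.map (fun c =>
    String.ofList [lettersL.getD (lab.getD ((PySem.List.index? lettersL c).getD 26) 0) 'a']))

-- ===== PRECONDITION & SPEC =====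
def lowerOKL (l : List Char) : Prop :=
  l.all (fun c => 97 ≤ c.toNat && c.toNat ≤ 122) = true


-- Pre_ excludes inputs containing characters outside 'a'..'z' (on which A raises IndexError or
-- returns a letter picked by accidental negative-list-index wraparound, while B raises ValueError),
-- and inputs with len(A) < len(B) (on which A raises IndexError). Characters of A beyond len(B)
-- are never read by A and stay unconstrained.
def Pre_rownowazne (A : String) (B : String) (C : String) : Prop :=
  B.toList.length ≤ A.toList.length ∧ lowerOKL (A.toList.take B.toList.length) ∧
    lowerOKL B.toList ∧ lowerOKL C.toList

instance (A : String) (B : String) (C : String) : Decidable (Pre_rownowazne A B C) := by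
  unfold Pre_rownowazne lowerOKL; infer_instance

def pvWitness_rownowazne : String × String × String := ("abx", "ba", "abcz")

def Spec_rownowazne (A : String) (B : String) (C : String) (out : String) : Prop :=
  out = rownowazne_alt A B C

instance (A : String) (B : String) (C : String) (out : String) : Decidable (Spec_rownowazne A B C out) := by
  unfold Spec_rownowazne; infer_instance

-- ===== CLAIM (what is proved, stated in full; the proofs are below) =====
def Claim_equal_rownowazne : Prop := ∀ (A : String) (B : String) (C : String),
  Dom_rownowazne A B C → Pre_rownowazne A B C → Spec_rownowazne A B C (rownowazne A B C)


-- ===== LEMMAS AND PROOFS =====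

-- ---- generic list facts ----
theorem pvSumSet (l : List Nat) (i v : Nat) (h : i < l.length) :
    (l.set i v).sum + l[i] = l.sum + v := by
  induction l generalizing i with
  | nil => simp at h
  | cons a t ih =>
    cases i with
    | zero => simp [List.set]; omega
    | succ j =>
      simp only [List.set, List.sum_cons, List.getElem_cons_succ]
      have := ih j (by simpa using h)
      omega

theorem pvZipTake (la lb : List Char) : la.zip lb = (la.take lb.length).zip lb := by
  induction la generalizing lb with
  | nil => simp
  | cons a t ih =>
    cases lb with
    | nil => simp
    | cons b tb => simp [List.zip_cons_cons, ih tb]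

theorem pvFoldlRangeGetD {α β : Type} (f : β → α → β) (d : α) (l : List α) (st : β) :
    (List.range l.length).foldl (fun st i => f st (l.getD i d)) st = l.foldl f st := by
  induction l using List.reverseRecOn generalizing st with
  | nil => rfl
  | append_singleton t b ih =>
    rw [List.length_append, List.length_singleton, List.range_succ, List.foldl_append,
      List.foldl_append]
    have h1 : (List.range t.length).foldl (fun st i => f st ((t ++ [b]).getD i d)) st
        = (List.range t.length).foldl (fun st i => f st (t.getD i d)) st := by
      apply PySem.List.foldl_congr_mem
      intro s i hi
      have hlt : i < t.length := List.mem_range.mp hi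
      have : (t ++ [b]).getD i d = t.getD i d := by
        simp [List.getD, List.getElem?_append_left hlt]
      rw [this]
    rw [h1, ih]
    simp [List.getD]

theorem pvLowerMem {l : List Char} {c : Char} (h : lowerOKL l) (hc : c ∈ l) :
    97 ≤ c.toNat ∧ c.toNat ≤ 122 := by
  have := List.all_eq_true.mp h c hc
  simpa using this

theorem pvLowerTail {c : Char} {t : List Char} (h : lowerOKL (c :: t)) : lowerOKL t := by
  simp only [lowerOKL, List.all_cons, Bool.and_eq_true] at h ⊢
  exact h.2

-- ---- characters ----
theorem pvOfNatToNat (n : Nat) (h : n ≤ 122) : (Char.ofNat n).toNat = n := by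
  unfold Char.ofNat
  rw [dif_pos (by constructor; omega)]
  rfl

theorem pvCharEq (c : Char) (n : Nat) (h : c.toNat = n) (hv2 : n ≤ 122) :
    c = Char.ofNat n := by
  apply Char.ext
  apply UInt32.toNat_inj.mp
  exact h.trans (pvOfNatToNat n hv2).symm

theorem pvIdxChar (c : Char) (h1 : 97 ≤ c.toNat) (h2 : c.toNat ≤ 122) :
    PySem.List.index? lettersL c = some (c.toNat - 97) := by
  obtain ⟨n, hn⟩ : ∃ n, c.toNat = n := ⟨_, rfl⟩
  rw [hn] at h1 h2 ⊢
  rw [pvCharEq c n hn h2]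
  interval_cases n <;> decide

theorem pvLettersGetD (k : Nat) (hk : k < 26) : lettersL.getD k 'a' = Char.ofNat (97 + k) := by
  interval_cases k <;> decide

-- ---- the common spec: connected components of the edge list ----
def stepRel (E : List (Nat × Nat)) (x y : Nat) : Prop := (x, y) ∈ E ∨ (y, x) ∈ E

def Reach (E : List (Nat × Nat)) : Nat → Nat → Prop := Relation.ReflTransGen (stepRel E)

def MinClass (E : List (Nat × Nat)) (x m : Nat) : Prop :=
  Reach E x m ∧ ∀ y, Reach E x y → m ≤ y

def EdgesOK (E : List (Nat × Nat)) : Prop := ∀ e ∈ E, e.1 < 26 ∧ e.2 < 26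

theorem pvReachSymm {E : List (Nat × Nat)} {x y : Nat} (h : Reach E x y) : Reach E y x := by
  apply Relation.ReflTransGen.symmetric _ h
  intro a b hab
  unfold stepRel at *; tauto

theorem pvReachTrans {E : List (Nat × Nat)} {x y z : Nat} (h1 : Reach E x y) (h2 : Reach E y z) :
    Reach E x z := Relation.ReflTransGen.trans h1 h2

theorem pvMinClassUnique {E : List (Nat × Nat)} {x m m' : Nat}
    (h1 : MinClass E x m) (h2 : MinClass E x m') : m = m' :=
  Nat.le_antisymm (h1.2 m' h2.1) (h2.2 m h1.1)

theorem pvMinClassCongr {E : List (Nat × Nat)} {x y m : Nat}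
    (hxy : Reach E x y) (h : MinClass E x m) : MinClass E y m :=
  ⟨pvReachTrans (pvReachSymm hxy) h.1, fun z hz => h.2 z (pvReachTrans hxy hz)⟩

theorem pvReachMono {E : List (Nat × Nat)} (e : Nat × Nat) {x y : Nat} (h : Reach E x y) :
    Reach (E ++ [e]) x y := by
  apply Relation.ReflTransGen.mono _ h
  intro a b hab
  unfold stepRel at *
  rcases hab with h | h
  · exact Or.inl (List.mem_append_left _ h)
  · exact Or.inr (List.mem_append_left _ h)

theorem pvReachEdge (E : List (Nat × Nat)) (a b : Nat) : Reach (E ++ [(a, b)]) a b :=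
  Relation.ReflTransGen.single (Or.inl (List.mem_append_right _ (List.mem_singleton.mpr rfl)))

theorem pvReachAppend {E : List (Nat × Nat)} {a b x y : Nat} (h : Reach (E ++ [(a, b)]) x y) :
    Reach E x y ∨ (Reach E x a ∧ Reach E b y) ∨ (Reach E x b ∧ Reach E a y) := by
  induction h with
  | refl => exact Or.inl Relation.ReflTransGen.refl
  | tail _ hstep ih =>
    rename_i u v _
    have hs : stepRel E u v ∨ (u = a ∧ v = b) ∨ (u = b ∧ v = a) := by
      unfold stepRel at hstep ⊢
      rcases hstep with h | h <;> rw [List.mem_append, List.mem_singleton] at h <;>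
        rcases h with h | h
      · exact Or.inl (Or.inl h)
      · obtain ⟨h1, h2⟩ := Prod.mk.inj h
        exact Or.inr (Or.inl ⟨h1, h2⟩)
      · exact Or.inl (Or.inr h)
      · obtain ⟨h1, h2⟩ := Prod.mk.inj h
        exact Or.inr (Or.inr ⟨h2, h1⟩)
    have hsv : stepRel E u v → Reach E u v := Relation.ReflTransGen.single
    rcases hs with h | ⟨h1, h2⟩ | ⟨h1, h2⟩
    · rcases ih with ih | ⟨i1, i2⟩ | ⟨i1, i2⟩
      · exact Or.inl (pvReachTrans ih (hsv h))
      · exact Or.inr (Or.inl ⟨i1, pvReachTrans i2 (hsv h)⟩)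
      · exact Or.inr (Or.inr ⟨i1, pvReachTrans i2 (hsv h)⟩)
    · subst h1; subst h2
      rcases ih with ih | ⟨i1, i2⟩ | ⟨i1, i2⟩
      · exact Or.inr (Or.inl ⟨ih, Relation.ReflTransGen.refl⟩)
      · exact Or.inr (Or.inl ⟨i1, Relation.ReflTransGen.refl⟩)
      · exact Or.inl i1
    · subst h1; subst h2
      rcases ih with ih | ⟨i1, i2⟩ | ⟨i1, i2⟩
      · exact Or.inr (Or.inr ⟨ih, Relation.ReflTransGen.refl⟩)
      · exact Or.inl i1
      · exact Or.inr (Or.inr ⟨i1, Relation.ReflTransGen.refl⟩)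

theorem pvReachBound {E : List (Nat × Nat)} (hE : EdgesOK E) {x y : Nat} (hx : x < 26)
    (h : Reach E x y) : y < 26 := by
  induction h with
  | refl => exact hx
  | tail _ hstep ih =>
    rcases hstep with h | h
    · exact (hE _ h).2
    · exact (hE _ h).1

-- ---- union-find: roots ----
def rootF : Nat → List Nat → Nat → Nat
  | 0, _, x => x
  | f+1, p, x => if p.getD x x = x then x else rootF f p (p.getD x x)

theorem pvRootFSucc (f : Nat) (p : List Nat) (x : Nat) :
    rootF (f+1) p x = if p.getD x x = x then x else rootF f p (p.getD x x) := rfl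

def Root (p : List Nat) (x : Nat) : Nat := rootF 26 p x

def Wf (p : List Nat) : Prop := p.length = 26 ∧ ∀ x, x < 26 → p.getD x x ≤ x

theorem pvRootStable {p : List Nat} (hp : Wf p) : ∀ x, x < 26 → ∀ f g, x < f → x < g →
    rootF f p x = rootF g p x := by
  intro x
  induction x using Nat.strong_induction_on with
  | _ x ih =>
    intro hx f g hf hg
    obtain ⟨f, rfl⟩ : ∃ f', f = f' + 1 := ⟨f - 1, by omega⟩
    obtain ⟨g, rfl⟩ : ∃ g', g = g' + 1 := ⟨g - 1, by omega⟩
    rw [pvRootFSucc, pvRootFSucc]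
    by_cases hpx : p.getD x x = x
    · rw [if_pos hpx, if_pos hpx]
    · have hlt : p.getD x x < x := Nat.lt_of_le_of_ne (hp.2 x hx) hpx
      rw [if_neg hpx, if_neg hpx]
      exact ih _ hlt (by omega) f g (by omega) (by omega)

theorem pvRootLe {p : List Nat} (hp : Wf p) : ∀ x, x < 26 → Root p x ≤ x := by
  have aux : ∀ f x, x < 26 → x < f → rootF f p x ≤ x := by
    intro f
    induction f with
    | zero => intro x _ h; omega
    | succ f ih =>
      intro x hx _
      rw [pvRootFSucc]
      by_cases hpx : p.getD x x = x
      · rw [if_pos hpx]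
      · have hlt : p.getD x x < x := Nat.lt_of_le_of_ne (hp.2 x hx) hpx
        rw [if_neg hpx]
        exact le_trans (ih _ (by omega) (by omega)) (by omega)
  intro x hx; exact aux 26 x hx hx

theorem pvRootLt {p : List Nat} (hp : Wf p) (x : Nat) (hx : x < 26) : Root p x < 26 :=
  lt_of_le_of_lt (pvRootLe hp x hx) hx

theorem pvRootOfFixed {p : List Nat} (r : Nat) (h : p.getD r r = r) : Root p r = r := by
  unfold Root
  rw [show (26 : Nat) = 25 + 1 from rfl, pvRootFSucc, if_pos h]

theorem pvRootStep {p : List Nat} (hp : Wf p) {x : Nat} (hx : x < 26)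
    (hpx : p.getD x x ≠ x) : Root p x = Root p (p.getD x x) := by
  have hlt : p.getD x x < x := Nat.lt_of_le_of_ne (hp.2 x hx) hpx
  unfold Root
  conv_lhs => rw [show (26 : Nat) = 25 + 1 from rfl, pvRootFSucc, if_neg hpx]
  exact pvRootStable hp _ (by omega) 25 26 (by omega) (by omega)

theorem pvRootFixed {p : List Nat} (hp : Wf p) : ∀ x, x < 26 →
    p.getD (Root p x) (Root p x) = Root p x := by
  intro x
  induction x using Nat.strong_induction_on with
  | _ x ih =>
    intro hx
    by_cases hpx : p.getD x x = x
    · rw [pvRootOfFixed x hpx]; exact hpx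
    · have hlt : p.getD x x < x := Nat.lt_of_le_of_ne (hp.2 x hx) hpx
      rw [pvRootStep hp hx hpx]
      exact ih _ hlt (by omega)

theorem pvRootIdem {p : List Nat} (hp : Wf p) (x : Nat) (hx : x < 26) :
    Root p (Root p x) = Root p x :=
  pvRootOfFixed _ (pvRootFixed hp x hx)

theorem pvSetGetD (p : List Nat) (x r : Nat) (hx : x < p.length) :
    ∀ y, (p.set x r).getD y y = if y = x then r else p.getD y y := by
  intro y
  by_cases hyx : y = x
  · subst hyx
    rw [if_pos rfl]
    simp [List.getD, List.getElem?_set_self hx]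
  · rw [if_neg hyx]
    simp [List.getD, List.getElem?_set_ne (fun h => hyx h.symm)]

-- setting x to its own root preserves all roots
theorem pvRootSetSelf {p : List Nat} (hp : Wf p) {x : Nat} (hx : x < 26)
    (r : Nat) (hr : r = Root p x) :
    Wf (p.set x r) ∧ ∀ y, y < 26 → Root (p.set x r) y = Root p y := by
  have hrle : r ≤ x := hr ▸ pvRootLe hp x hx
  have hlen : p.length = 26 := hp.1
  have hgetD := pvSetGetD p x r (by omega)
  have hq : Wf (p.set x r) := by
    refine ⟨by simp [hlen], fun y hy => ?_⟩
    rw [hgetD y]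
    by_cases hyx : y = x
    · rw [if_pos hyx]; omega
    · rw [if_neg hyx]; exact hp.2 y hy
  refine ⟨hq, ?_⟩
  intro y
  induction y using Nat.strong_induction_on with
  | _ y ih =>
    intro hy
    by_cases hyx : y = x
    · subst hyx
      by_cases hrx : r = y
      · have h1 : (p.set y r).getD y y = y := by rw [hgetD y, if_pos rfl, hrx]
        rw [pvRootOfFixed y h1, ← hr, hrx]
      · have h1 : (p.set y r).getD y y = r := by rw [hgetD y, if_pos rfl]
        have h2 : Root (p.set y r) y = Root (p.set y r) r := by
          rw [pvRootStep hq hy (by rw [h1]; exact fun h => hrx h)]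
          rw [h1]
        have hrroot : p.getD r r = r := by rw [hr]; exact pvRootFixed hp y hy
        have h3 : (p.set y r).getD r r = r := by rw [hgetD r, if_neg hrx, hrroot]
        rw [h2, pvRootOfFixed r h3, hr]
    · have hget : (p.set x r).getD y y = p.getD y y := by rw [hgetD y, if_neg hyx]
      by_cases hpy : p.getD y y = y
      · rw [pvRootOfFixed y (hget.trans hpy), pvRootOfFixed y hpy]
      · have hlt : p.getD y y < y := Nat.lt_of_le_of_ne (hp.2 y hy) hpy
        rw [pvRootStep hq hy (by rw [hget]; exact hpy), hget, pvRootStep hp hy hpy]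
        exact ih _ hlt (by omega)

-- redirecting root rb to root ra (ra < rb) merges the two classes
theorem pvRootSetRedirect {p : List Nat} (hp : Wf p) {ra rb : Nat}
    (hra : ra < 26) (hrb : rb < 26) (hfa : p.getD ra ra = ra) (hfb : p.getD rb rb = rb)
    (hlt : ra < rb) :
    Wf (p.set rb ra) ∧ ∀ y, y < 26 →
      Root (p.set rb ra) y = if Root p y = rb then ra else Root p y := by
  have hlen : p.length = 26 := hp.1
  have hgetD := pvSetGetD p rb ra (by omega)
  have hq : Wf (p.set rb ra) := by
    refine ⟨by simp [hlen], fun y hy => ?_⟩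
    rw [hgetD y]
    by_cases hyx : y = rb
    · rw [if_pos hyx]; omega
    · rw [if_neg hyx]; exact hp.2 y hy
  refine ⟨hq, ?_⟩
  intro y
  induction y using Nat.strong_induction_on with
  | _ y ih =>
    intro hy
    by_cases hyb : y = rb
    · subst hyb
      rw [pvRootOfFixed y hfb, if_pos rfl]
      have h1 : (p.set y ra).getD y y = ra := by rw [hgetD y, if_pos rfl]
      have h2 : Root (p.set y ra) y = Root (p.set y ra) ra := by
        rw [pvRootStep hq hy (by rw [h1]; omega), h1]
      have h3 : (p.set y ra).getD ra ra = ra := by rw [hgetD ra, if_neg (by omega), hfa]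
      rw [h2, pvRootOfFixed ra h3]
    · have hget : (p.set rb ra).getD y y = p.getD y y := by rw [hgetD y, if_neg hyb]
      by_cases hpy : p.getD y y = y
      · have hry : Root p y = y := pvRootOfFixed y hpy
        rw [pvRootOfFixed y (hget.trans hpy), hry, if_neg hyb]
      · have hplt : p.getD y y < y := Nat.lt_of_le_of_ne (hp.2 y hy) hpy
        rw [pvRootStep hq hy (by rw [hget]; exact hpy), hget, pvRootStep hp hy hpy]
        exact ih _ hplt (by omega)

theorem pvGetDRootFixed {p : List Nat} (hp : Wf p) {r : Nat} (hr : r < 26)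
    (h : Root p r = r) : p.getD r r = r := by
  by_contra hne
  have hlt : p.getD r r < r := Nat.lt_of_le_of_ne (hp.2 r hr) hne
  have hstep := pvRootStep hp hr hne
  have hle := pvRootLe hp (p.getD r r) (by omega)
  rw [h] at hstep
  omega

-- find: returns the root and preserves the root function
theorem pvUfFindSpec : ∀ f p x, Wf p → x < 26 → x < f →
    (ufFind f p x).2 = Root p x ∧ Wf (ufFind f p x).1 ∧
      ∀ y, y < 26 → Root (ufFind f p x).1 y = Root p y := by
  intro f
  induction f with
  | zero => intro p x _ _ h; omega
  | succ f ih =>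
    intro p x hp hx hf
    simp only [ufFind]
    by_cases hpx : p.getD x x = x
    · simp only [hpx]
      exact ⟨(pvRootOfFixed x hpx).symm, hp, fun y _ => rfl⟩
    · have hlt : p.getD x x < x := Nat.lt_of_le_of_ne (hp.2 x hx) hpx
      simp only [if_neg hpx]
      obtain ⟨h1, h2, h3⟩ := ih p (p.getD x x) hp (by omega) (by omega)
      set q := (ufFind f p (p.getD x x)).1 with hqdef
      set r := (ufFind f p (p.getD x x)).2 with hrdef
      have hrx : r = Root p x := by rw [h1, ← pvRootStep hp hx hpx]
      have hrq : r = Root q x := by rw [hrx, ← h3 x hx]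
      obtain ⟨hwf, hpres⟩ := pvRootSetSelf h2 hx r hrq
      refine ⟨hrx, hwf, fun y hy => ?_⟩
      rw [hpres y hy, h3 y hy]

theorem pvUfUnionSpec (p : List Nat) (a b : Nat) (hp : Wf p) (ha : a < 26) (hb : b < 26)
    (hne : Root p a ≠ Root p b) :
    Wf (ufUnion p a b) ∧ ∀ y, y < 26 →
      Root (ufUnion p a b) y =
        if Root p y = max (Root p a) (Root p b) then min (Root p a) (Root p b) else Root p y := by
  simp only [ufUnion]
  obtain ⟨h1, h2, h3⟩ := pvUfFindSpec 26 p a hp ha ha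
  set p1 := (ufFind 26 p a).1
  obtain ⟨g1, g2, g3⟩ := pvUfFindSpec 26 p1 b h2 hb hb
  set p2 := (ufFind 26 p1 b).1
  have hra : (ufFind 26 p a).2 = Root p a := h1
  have hrb : (ufFind 26 p1 b).2 = Root p b := by rw [g1, h3 b hb]
  have hroots : ∀ y, y < 26 → Root p2 y = Root p y := fun y hy => (g3 y hy).trans (h3 y hy)
  have hfa : p2.getD (Root p a) (Root p a) = Root p a := by
    apply pvGetDRootFixed g2 (pvRootLt hp a ha)
    rw [hroots _ (pvRootLt hp a ha)]
    exact pvRootIdem hp a ha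
  have hfb : p2.getD (Root p b) (Root p b) = Root p b := by
    apply pvGetDRootFixed g2 (pvRootLt hp b hb)
    rw [hroots _ (pvRootLt hp b hb)]
    exact pvRootIdem hp b hb
  rw [hra, hrb]
  by_cases hcase : Root p a = Root p b
  · exact absurd hcase hne
  · simp only [if_neg hcase]
    by_cases hord : Root p a < Root p b
    · simp only [if_pos hord]
      obtain ⟨hwf, hres⟩ := pvRootSetRedirect g2 (pvRootLt hp a ha) (pvRootLt hp b hb) hfa hfb hord
      refine ⟨hwf, fun y hy => ?_⟩
      rw [hres y hy, hroots y hy]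
      have hmax : max (Root p a) (Root p b) = Root p b := by omega
      have hmin : min (Root p a) (Root p b) = Root p a := by omega
      rw [hmax, hmin]
    · have hord' : Root p b < Root p a := by omega
      simp only [if_neg hord]
      obtain ⟨hwf, hres⟩ := pvRootSetRedirect g2 (pvRootLt hp b hb) (pvRootLt hp a ha) hfb hfa hord'
      refine ⟨hwf, fun y hy => ?_⟩
      rw [hres y hy, hroots y hy]
      have hmax : max (Root p a) (Root p b) = Root p a := by omega
      have hmin : min (Root p a) (Root p b) = Root p b := by omega
      rw [hmax, hmin]

theorem pvUfStepSpec (p : List Nat) (a b : Nat) (hp : Wf p) (ha : a < 26) (hb : b < 26) :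
    Wf (ufStep p a b) ∧ ∀ y, y < 26 →
      Root (ufStep p a b) y =
        if Root p a = Root p b then Root p y
        else if Root p y = max (Root p a) (Root p b) then min (Root p a) (Root p b)
        else Root p y := by
  simp only [ufStep]
  obtain ⟨h1, h2, h3⟩ := pvUfFindSpec 26 p a hp ha ha
  set p1 := (ufFind 26 p a).1
  obtain ⟨g1, g2, g3⟩ := pvUfFindSpec 26 p1 b h2 hb hb
  set p2 := (ufFind 26 p1 b).1
  have hra : (ufFind 26 p a).2 = Root p a := h1
  have hrb : (ufFind 26 p1 b).2 = Root p b := by rw [g1, h3 b hb]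
  have hroots : ∀ y, y < 26 → Root p2 y = Root p y := fun y hy => (g3 y hy).trans (h3 y hy)
  rw [hra, hrb]
  by_cases hcase : Root p a = Root p b
  · rw [if_neg (by simp [hcase] : ¬ Root p a ≠ Root p b)]
    refine ⟨g2, fun y hy => ?_⟩
    rw [if_pos hcase]
    exact hroots y hy
  · simp only [if_pos (by simp [hcase] : Root p a ≠ Root p b), if_neg hcase]
    have hpa : Root p2 a = Root p a := hroots a ha
    have hpb : Root p2 b = Root p b := hroots b hb
    have hne2 : Root p2 a ≠ Root p2 b := by rw [hpa, hpb]; exact hcase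
    obtain ⟨hwf, hres⟩ := pvUfUnionSpec p2 a b g2 ha hb hne2
    refine ⟨hwf, fun y hy => ?_⟩
    rw [hres y hy, hroots y hy, hpa, hpb]

-- ---- union-find invariant: roots are component minima ----
def UFInv (E : List (Nat × Nat)) (p : List Nat) : Prop :=
  Wf p ∧ ∀ x, x < 26 → MinClass E x (Root p x)

theorem pvRootEqIffReach {E : List (Nat × Nat)} {p : List Nat} (h : UFInv E p)
    {x y : Nat} (hx : x < 26) (hy : y < 26) : Reach E x y ↔ Root p x = Root p y := by
  constructor
  · intro hr
    exact pvMinClassUnique (pvMinClassCongr hr (h.2 x hx)) (h.2 y hy)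
  · intro he
    have h1 := (h.2 x hx).1
    have h2 := (h.2 y hy).1
    rw [he] at h1
    exact pvReachTrans h1 (pvReachSymm h2)

theorem pvUFInvStep {E : List (Nat × Nat)} {p : List Nat} (h : UFInv E p)
    {a b : Nat} (ha : a < 26) (hb : b < 26) :
    UFInv (E ++ [(a, b)]) (ufStep p a b) := by
  obtain ⟨hwf, hres⟩ := pvUfStepSpec p a b h.1 ha hb
  refine ⟨hwf, fun x hx => ?_⟩
  rw [hres x hx]
  by_cases hcase : Root p a = Root p b
  · -- a and b already connected: classes unchanged
    simp only [if_pos hcase]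
    have hab : Reach E a b := (pvRootEqIffReach h ha hb).mpr hcase
    have hmc := h.2 x hx
    constructor
    · exact pvReachMono _ hmc.1
    · intro y hy
      rcases pvReachAppend hy with hr | ⟨h1, h2⟩ | ⟨h1, h2⟩
      · exact hmc.2 y hr
      · exact hmc.2 y (pvReachTrans h1 (pvReachTrans hab h2))
      · exact hmc.2 y (pvReachTrans h1 (pvReachTrans (pvReachSymm hab) h2))
  · simp only [if_neg hcase]
    set ra := Root p a with hradef
    set rb := Root p b with hrbdef
    have hmca := h.2 a ha
    have hmcb := h.2 b hb
    have hmcx := h.2 x hx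
    by_cases hxm : Root p x = max ra rb
    · simp only [if_pos hxm]
      -- x's class is the class of the larger root; new representative is min ra rb
      have hxa_or : (Root p x = ra ∧ rb < ra) ∨ (Root p x = rb ∧ ra < rb) := by
        rcases Nat.lt_or_ge ra rb with h' | h'
        · exact Or.inr ⟨by omega, by omega⟩
        · have : ra ≠ rb := hcase
          exact Or.inl ⟨by omega, by omega⟩
      constructor
      · -- Reach E' x (min ra rb)
        rcases hxa_or with ⟨hxe, _⟩ | ⟨hxe, _⟩
        · -- x ~E a, min = rb reached via the new edge
          have hxa : Reach E x a := (pvRootEqIffReach h hx ha).mpr hxe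
          have hmin : min ra rb = rb := by omega
          rw [hmin]
          exact pvReachTrans (pvReachMono _ hxa)
            (pvReachTrans (pvReachEdge E a b) (pvReachMono _ hmcb.1))
        · have hxb : Reach E x b := (pvRootEqIffReach h hx hb).mpr hxe
          have hmin : min ra rb = ra := by omega
          rw [hmin]
          exact pvReachTrans (pvReachMono _ hxb)
            (pvReachTrans (pvReachSymm (pvReachEdge E a b)) (pvReachMono _ hmca.1))
      · intro y hy
        have hminra : min ra rb ≤ ra := by omega
        have hminrb : min ra rb ≤ rb := by omega
        rcases pvReachAppend hy with hr | ⟨h1, h2⟩ | ⟨h1, h2⟩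
        · have : Root p x ≤ y := hmcx.2 y hr
          omega
        · exact le_trans hminrb (hmcb.2 y h2)
        · exact le_trans hminra (hmca.2 y h2)
    · simp only [if_neg hxm]
      -- x's class contains neither a nor b (or only the smaller root): class unchanged? No:
      -- class of x is disjoint from the merged pair's larger class; if it equals the smaller
      -- root's class the representative min ra rb = that root is already Root p x.
      constructor
      · exact pvReachMono _ hmcx.1
      · intro y hy
        rcases pvReachAppend hy with hr | ⟨h1, h2⟩ | ⟨h1, h2⟩
        · exact hmcx.2 y hr
        · -- x ~E a: then Root p x = ra and ra ≠ max, so ra = min ra rb ≤ rb-class min rb ≤ y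
          have hxa : Root p x = ra := (pvRootEqIffReach h hx ha).mp h1
          have hlt : ra < rb := by
            rcases Nat.lt_or_ge ra rb with h' | h'
            · exact h'
            · exfalso; apply hxm; rw [hxa]; omega
          have : rb ≤ y := hmcb.2 y h2
          omega
        · have hxb : Root p x = rb := (pvRootEqIffReach h hx hb).mp h1
          have hlt : rb < ra := by
            rcases Nat.lt_or_ge rb ra with h' | h'
            · exact h'
            · exfalso; apply hxm; rw [hxb]; omega
          have : ra ≤ y := hmca.2 y h2
          omega

def ufStepP (p : List Nat) (e : Nat × Nat) : List Nat := ufStep p e.1 e.2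

theorem pvUFInvFold : ∀ (l F : List (Nat × Nat)) (p : List Nat), UFInv F p → EdgesOK l →
    UFInv (F ++ l) (l.foldl ufStepP p) := by
  intro l
  induction l with
  | nil => intro F p h _; simpa using h
  | cons e t ih =>
    intro F p h hok
    have he := hok e List.mem_cons_self
    have h1 : UFInv (F ++ [e]) (ufStepP p e) := pvUFInvStep h he.1 he.2
    have h2 := ih (F ++ [e]) (ufStepP p e) h1 (fun x hx => hok x (List.mem_cons_of_mem _ hx))
    simpa using h2

theorem pvUFInvInit : UFInv [] (List.range 26) := by
  have hwf : Wf (List.range 26) := by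
    refine ⟨by simp, fun x hx => ?_⟩
    simp [List.getD, List.getElem?_range hx]
  refine ⟨hwf, fun x hx => ?_⟩
  have hroot : Root (List.range 26) x = x := by
    apply pvRootOfFixed
    simp [List.getD, List.getElem?_range hx]
  rw [hroot]
  constructor
  · exact Relation.ReflTransGen.refl
  · intro y hy
    have : y = x := by
      rcases (Relation.reflTransGen_iff_eq (by intro z hz; rcases hz with h | h <;> simp at h)).mp
        hy with h
      omega
    omega

-- ---- label propagation ----
def LabInv (E : List (Nat × Nat)) (lab : List Nat) : Prop :=
  lab.length = 26 ∧ ∀ x, x < 26 → lab.getD x 0 ≤ x ∧ Reach E x (lab.getD x 0)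

theorem pvLabSetGetD (lab : List Nat) (i m x : Nat) (hi : i < lab.length) :
    (lab.set i m).getD x 0 = if x = i then m else lab.getD x 0 := by
  by_cases hx : x = i
  · subst hx
    rw [if_pos rfl]
    simp [List.getD, List.getElem?_set_self hi]
  · rw [if_neg hx]
    simp [List.getD, List.getElem?_set_ne (fun h => hx h.symm)]

theorem pvLabPassInv {E : List (Nat × Nat)} {lab : List Nat} (hE : EdgesOK E)
    (h : LabInv E lab) : LabInv E (labPass E lab).1 := by
  unfold labPass
  -- fold over a sublist of E, keeping the invariant
  suffices haux : ∀ (l : List (Nat × Nat)) (st : List Nat × Bool), (∀ e ∈ l, e ∈ E) →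
      LabInv E st.1 →
      LabInv E (l.foldl (fun st e =>
        let m := min (st.1.getD e.1 0) (st.1.getD e.2 0)
        if st.1.getD e.1 0 ≠ m ∨ st.1.getD e.2 0 ≠ m then ((st.1.set e.1 m).set e.2 m, true)
        else st) st).1 by
    exact haux E (lab, false) (fun e he => he) h
  intro l
  induction l with
  | nil => intro st _ h; exact h
  | cons e t ih =>
    intro st hsub hst
    rw [List.foldl_cons]
    apply ih _ (fun x hx => hsub x (List.mem_cons_of_mem _ hx))
    by_cases hcond : st.1.getD e.1 0 ≠ min (st.1.getD e.1 0) (st.1.getD e.2 0) ∨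
        st.1.getD e.2 0 ≠ min (st.1.getD e.1 0) (st.1.getD e.2 0)
    · simp only [if_pos hcond]
      have he := hE e (hsub e List.mem_cons_self)
      obtain ⟨he1, he2⟩ := he
      have hlen : st.1.length = 26 := hst.1
      set m := min (st.1.getD e.1 0) (st.1.getD e.2 0) with hm
      have hgoal : LabInv E ((st.1.set e.1 m).set e.2 m) := by
        refine ⟨by simp [hlen], fun x hx => ?_⟩
        have hget : ((st.1.set e.1 m).set e.2 m).getD x 0 =
            if x = e.2 then m else if x = e.1 then m else st.1.getD x 0 := by
          rw [pvLabSetGetD _ _ _ _ (by simp [hlen]; omega)]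
          by_cases hx2 : x = e.2
          · simp [hx2]
          · simp only [if_neg hx2]
            rw [pvLabSetGetD _ _ _ _ (by omega)]
        rw [hget]
        have hme : Reach E e.1 m ∧ Reach E e.2 m := by
          have hedge : Reach E e.1 e.2 :=
            Relation.ReflTransGen.single (Or.inl (by simpa using hsub e List.mem_cons_self))
          rcases Nat.le_total (st.1.getD e.1 0) (st.1.getD e.2 0) with h' | h'
          · have hmm : m = st.1.getD e.1 0 := by rw [hm]; exact Nat.min_eq_left h'
            rw [hmm]
            exact ⟨(hst.2 e.1 he1).2, pvReachTrans (pvReachSymm hedge) (hst.2 e.1 he1).2⟩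
          · have hmm : m = st.1.getD e.2 0 := by rw [hm]; exact Nat.min_eq_right h'
            rw [hmm]
            exact ⟨pvReachTrans hedge (hst.2 e.2 he2).2, (hst.2 e.2 he2).2⟩
        by_cases hx2 : x = e.2
        · subst hx2
          rw [if_pos rfl]
          exact ⟨le_trans (by rw [hm]; exact Nat.min_le_right _ _) (hst.2 e.2 he2).1, hme.2⟩
        · simp only [if_neg hx2]
          by_cases hx1 : x = e.1
          · subst hx1
            rw [if_pos rfl]
            exact ⟨le_trans (by rw [hm]; exact Nat.min_le_left _ _) (hst.2 e.1 he1).1, hme.1⟩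
          · simp only [if_neg hx1]
            exact hst.2 x hx
      exact hgoal
    · simp only [if_neg hcond]
      exact hst

theorem pvLabPassSum {E : List (Nat × Nat)} {lab : List Nat} (hE : EdgesOK E)
    (hlen : lab.length = 26) :
    (labPass E lab).1.sum ≤ lab.sum ∧
      ((labPass E lab).2 = true → (labPass E lab).1.sum < lab.sum) := by
  unfold labPass
  suffices haux : ∀ (l : List (Nat × Nat)) (st : List Nat × Bool), (∀ e ∈ l, e ∈ E) →
      st.1.length = 26 →
      (l.foldl (fun st e =>
        let m := min (st.1.getD e.1 0) (st.1.getD e.2 0)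
        if st.1.getD e.1 0 ≠ m ∨ st.1.getD e.2 0 ≠ m then ((st.1.set e.1 m).set e.2 m, true)
        else st) st).1.sum ≤ st.1.sum ∧
      (l.foldl (fun st e =>
        let m := min (st.1.getD e.1 0) (st.1.getD e.2 0)
        if st.1.getD e.1 0 ≠ m ∨ st.1.getD e.2 0 ≠ m then ((st.1.set e.1 m).set e.2 m, true)
        else st) st).1.length = 26 ∧
      ((l.foldl (fun st e =>
        let m := min (st.1.getD e.1 0) (st.1.getD e.2 0)
        if st.1.getD e.1 0 ≠ m ∨ st.1.getD e.2 0 ≠ m then ((st.1.set e.1 m).set e.2 m, true)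
        else st) st).2 = true → st.2 = true ∨
        (l.foldl (fun st e =>
        let m := min (st.1.getD e.1 0) (st.1.getD e.2 0)
        if st.1.getD e.1 0 ≠ m ∨ st.1.getD e.2 0 ≠ m then ((st.1.set e.1 m).set e.2 m, true)
        else st) st).1.sum < st.1.sum) by
    obtain ⟨h1, _, h3⟩ := haux E (lab, false) (fun e he => he) hlen
    refine ⟨h1, fun ht => ?_⟩
    rcases h3 ht with h | h
    · simp at h
    · exact h
  intro l
  induction l with
  | nil => intro st _ h; exact ⟨le_refl _, h, fun ht => Or.inl ht⟩
  | cons e t ih =>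
    intro st hsub hlen'
    rw [List.foldl_cons]
    by_cases hcond : st.1.getD e.1 0 ≠ min (st.1.getD e.1 0) (st.1.getD e.2 0) ∨
        st.1.getD e.2 0 ≠ min (st.1.getD e.1 0) (st.1.getD e.2 0)
    · simp only [if_pos hcond]
      have he := hE e (hsub e List.mem_cons_self)
      set m := min (st.1.getD e.1 0) (st.1.getD e.2 0) with hm
      have he1 : e.1 < st.1.length := by omega
      have hgd1 : st.1.getD e.1 0 = st.1[e.1] := by simp [List.getD, List.getElem?_eq_getElem he1]
      have hsum : ((st.1.set e.1 m).set e.2 m).sum < st.1.sum := by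
        have he2' : e.2 < (st.1.set e.1 m).length := by simp; omega
        have h1 := pvSumSet st.1 e.1 m he1
        have h2 := pvSumSet (st.1.set e.1 m) e.2 m he2'
        by_cases heq : e.1 = e.2
        · -- same index set twice; then m = lab[e.1] contradicts the condition
          exfalso
          rcases hcond with h | h <;>
            · apply h
              rw [hm, ← heq]
              exact (Nat.min_self _).symm
        · have hget2 : (st.1.set e.1 m)[e.2] = st.1[e.2]'(by omega) := by
            rw [List.getElem_set_ne (fun h => heq h)]
          have hgd2 : st.1.getD e.2 0 = st.1[e.2]'(by omega) := by
            simp [List.getD, List.getElem?_eq_getElem (show e.2 < st.1.length by omega)]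
          have hle1 : m ≤ st.1.getD e.1 0 := by rw [hm]; exact Nat.min_le_left _ _
          have hle2 : m ≤ st.1.getD e.2 0 := by rw [hm]; exact Nat.min_le_right _ _
          have hmlt : m ≤ st.1[e.1] ∧ m ≤ st.1[e.2]'(by omega) ∧
              (m < st.1[e.1] ∨ m < st.1[e.2]'(by omega)) := by
            rw [← hgd1, ← hgd2]
            rcases hcond with h | h
            · exact ⟨hle1, hle2, Or.inl (by omega)⟩
            · exact ⟨hle1, hle2, Or.inr (by omega)⟩
          rw [hget2] at h2
          omega
      obtain ⟨i1, i2, i3⟩ := ih ((st.1.set e.1 m).set e.2 m, true)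
        (fun x hx => hsub x (List.mem_cons_of_mem _ hx)) (by simp [hlen'])
      refine ⟨le_trans i1 (by simp only; omega), i2, fun _ => Or.inr ?_⟩
      calc _ ≤ ((st.1.set e.1 m).set e.2 m).sum := i1
      _ < st.1.sum := hsum
    · simp only [if_neg hcond]
      exact ih st (fun x hx => hsub x (List.mem_cons_of_mem _ hx)) hlen'

theorem pvLabPassFix {E : List (Nat × Nat)} {lab : List Nat}
    (h : (labPass E lab).2 = false) : ∀ e ∈ E, lab.getD e.1 0 = lab.getD e.2 0 := by
  unfold labPass at h
  suffices haux : ∀ (l : List (Nat × Nat)) (lab : List Nat),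
      ((l.foldl (fun st e =>
        let m := min (st.1.getD e.1 0) (st.1.getD e.2 0)
        if st.1.getD e.1 0 ≠ m ∨ st.1.getD e.2 0 ≠ m then ((st.1.set e.1 m).set e.2 m, true)
        else st) (lab, false)).2 = false) → ∀ e ∈ l, lab.getD e.1 0 = lab.getD e.2 0 by
    exact haux E lab h
  intro l
  -- the changed flag, once true, stays true
  have habsorb : ∀ (l : List (Nat × Nat)) (st : List Nat × Bool), st.2 = true →
      (l.foldl (fun st e =>
        let m := min (st.1.getD e.1 0) (st.1.getD e.2 0)
        if st.1.getD e.1 0 ≠ m ∨ st.1.getD e.2 0 ≠ m then ((st.1.set e.1 m).set e.2 m, true)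
        else st) st).2 = true := by
    intro l
    induction l with
    | nil => intro st h; exact h
    | cons e t ih =>
      intro st h
      rw [List.foldl_cons]
      by_cases hcond : st.1.getD e.1 0 ≠ min (st.1.getD e.1 0) (st.1.getD e.2 0) ∨
          st.1.getD e.2 0 ≠ min (st.1.getD e.1 0) (st.1.getD e.2 0)
      · simp only [if_pos hcond]; exact ih _ rfl
      · simp only [if_neg hcond]; exact ih _ h
  induction l with
  | nil => intro lab _ e he; simp at he
  | cons e t ih =>
    intro lab h e' he'
    rw [List.foldl_cons] at h
    by_cases hcond : lab.getD e.1 0 ≠ min (lab.getD e.1 0) (lab.getD e.2 0) ∨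
        lab.getD e.2 0 ≠ min (lab.getD e.1 0) (lab.getD e.2 0)
    · exfalso
      simp only [if_pos hcond] at h
      rw [habsorb t _ rfl] at h
      exact Bool.true_eq_false.mp h
    · simp only [if_neg hcond] at h
      rw [not_or, not_not, not_not] at hcond
      rcases List.mem_cons.mp he' with he' | he'
      · subst he'; omega
      · exact ih lab h e' he'

theorem pvLabLoopSucc (f : Nat) (E : List (Nat × Nat)) (lab : List Nat) :
    labLoop (f+1) E lab =
      if (labPass E lab).2 then labLoop f E (labPass E lab).1 else lab := rfl

theorem pvLabLoop : ∀ (f : Nat) (E : List (Nat × Nat)) (lab : List Nat), EdgesOK E →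
    LabInv E lab → lab.sum < f →
    LabInv E (labLoop f E lab) ∧ (labPass E (labLoop f E lab)).2 = false := by
  intro f
  induction f with
  | zero => intro E lab _ _ h; omega
  | succ f ih =>
    intro E lab hE hinv hsum
    rw [pvLabLoopSucc]
    by_cases hch : (labPass E lab).2 = true
    · simp only [hch, if_true]
      have hinv' := pvLabPassInv hE hinv
      have hsum' := (pvLabPassSum hE hinv.1).2 hch
      exact ih E (labPass E lab).1 hE hinv' (by omega)
    · simp only [Bool.not_eq_true] at hch
      simp only [hch, Bool.false_eq_true, if_false]
      exact ⟨hinv, trivial⟩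

theorem pvLabEqReach {E : List (Nat × Nat)} {lab : List Nat}
    (hfix : ∀ e ∈ E, lab.getD e.1 0 = lab.getD e.2 0) {x y : Nat} (h : Reach E x y) :
    lab.getD x 0 = lab.getD y 0 := by
  induction h with
  | refl => rfl
  | tail _ hstep ih =>
    rcases hstep with h | h
    · exact ih.trans (hfix _ h)
    · exact ih.trans (hfix _ h).symm

theorem pvLabMinClass {E : List (Nat × Nat)} {lab : List Nat} (hE : EdgesOK E)
    (hinv : LabInv E lab) (hfix : ∀ e ∈ E, lab.getD e.1 0 = lab.getD e.2 0)
    (x : Nat) (hx : x < 26) : MinClass E x (lab.getD x 0) := by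
  constructor
  · exact (hinv.2 x hx).2
  · intro y hy
    have hy26 : y < 26 := pvReachBound hE hx hy
    rw [pvLabEqReach hfix hy]
    exact (hinv.2 y hy26).1

-- ---- bridges from the ports to the edge-list folds ----
def Espec (la lb : List Char) : List (Nat × Nat) :=
  (la.zip lb).map (fun ab => (ab.1.toNat - 97, ab.2.toNat - 97))

theorem pvEspecOK {la lb : List Char} (hA : lowerOKL (la.take lb.length))
    (hB : lowerOKL lb) : EdgesOK (Espec la lb) := by
  intro e he
  unfold Espec at he
  rw [List.mem_map] at he
  obtain ⟨ab, hab, rfl⟩ := he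
  rw [pvZipTake] at hab
  obtain ⟨h1, h2⟩ := List.of_mem_zip hab
  have h1' := pvLowerMem hA h1
  have h2' := pvLowerMem hB h2
  constructor <;> simp <;> omega

theorem pvMemZipBounds {la lb : List Char} (hA : lowerOKL (la.take lb.length))
    (hB : lowerOKL lb) {ab : Char × Char} (hab : ab ∈ la.zip lb) :
    97 ≤ ab.1.toNat ∧ ab.1.toNat ≤ 122 ∧ 97 ≤ ab.2.toNat ∧ ab.2.toNat ≤ 122 := by
  rw [pvZipTake] at hab
  obtain ⟨h1, h2⟩ := List.of_mem_zip hab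
  have h1' := pvLowerMem hA h1
  have h2' := pvLowerMem hB h2
  omega

-- B's edge list equals the spec edge list
theorem pvEdgesB {la lb : List Char} (hA : lowerOKL (la.take lb.length)) (hB : lowerOKL lb) :
    (la.zip lb).map (fun ab =>
      ((PySem.List.index? lettersL ab.1).getD 26, (PySem.List.index? lettersL ab.2).getD 26)) =
    Espec la lb := by
  unfold Espec
  apply List.map_congr_left
  intro ab hab
  obtain ⟨b1, b2, b3, b4⟩ := pvMemZipBounds hA hB hab
  rw [pvIdxChar ab.1 b1 b2, pvIdxChar ab.2 b3 b4]
  rfl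

-- fold projection: the parent component of A's loop, under an invariant on visited
theorem pvFoldlSndInv {α β γ : Type} (f : β × γ → α → β × γ) (g : γ → α → γ) (P : β → Prop)
    (l : List α) (h : ∀ st x, x ∈ l → P st.1 → (f st x).2 = g st.2 x ∧ P (f st x).1) :
    ∀ st, P st.1 → (l.foldl f st).2 = l.foldl g st.2 := by
  induction l with
  | nil => intro st _; rfl
  | cons a t ih =>
    intro st hP
    rw [List.foldl_cons, List.foldl_cons]
    obtain ⟨h1, h2⟩ := h st a List.mem_cons_self hP
    rw [← h1]
    exact ih (fun st x hx hP => h st x (List.mem_cons_of_mem _ hx) hP) _ h2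

-- A's union-find loop: its parent component is the edge-list fold
theorem pvLoopA {la lb : List Char} (hlen : lb.length ≤ la.length)
    (hA : lowerOKL (la.take lb.length)) (hB : lowerOKL lb) :
    ((List.range lb.length).foldl (aStep la lb) (List.replicate 26 false, List.range 26)).2 =
      (Espec la lb).foldl ufStepP (List.range 26) := by
  have hstep : ∀ (st : List Bool × List Nat) (i : Nat), i ∈ List.range lb.length →
      st.1.length = 26 →
      (aStep la lb st i).2 =
        ufStepP st.2 ((la.getD i 'a').toNat - 97, (lb.getD i 'a').toNat - 97) ∧
      (aStep la lb st i).1.length = 26 := by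
    intro st i hi hP
    have hilt : i < lb.length := List.mem_range.mp hi
    have hila : i < la.length := by omega
    have hb := pvLowerMem hB (List.getElem_mem (l := lb) (h := hilt))
    have hmemA : la[i] ∈ la.take lb.length := by
      have : la[i] = (la.take lb.length)[i]'(by simp; omega) := (List.getElem_take ..).symm
      rw [this]
      exact List.getElem_mem _
    have ha := pvLowerMem hA hmemA
    have hgb : PySem.List.pyGet? lb (i : Int) = some lb[i] := by
      rw [PySem.List.pyGet?_natCast, List.getElem?_eq_getElem hilt]
    have hga : PySem.List.pyGet? la (i : Int) = some la[i] := by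
      rw [PySem.List.pyGet?_natCast, List.getElem?_eq_getElem hila]
    have hznB : ((lb[i].toNat : Int) - 97) = ((lb[i].toNat - 97 : Nat) : Int) := by omega
    have hznA : ((la[i].toNat : Int) - 97) = ((la[i].toNat - 97 : Nat) : Int) := by omega
    have hsetB : PySem.List.pySet? st.1 ((lb[i].toNat : Int) - 97) true =
        some (st.1.set (lb[i].toNat - 97) true) := by
      rw [hznB]
      exact PySem.List.pySet?_natCast _ _ _ (by omega)
    have hsetA : PySem.List.pySet? (st.1.set (lb[i].toNat - 97) true) ((la[i].toNat : Int) - 97) true =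
        some ((st.1.set (lb[i].toNat - 97) true).set (la[i].toNat - 97) true) := by
      rw [hznA]
      exact PySem.List.pySet?_natCast _ _ _ (by simp only [List.length_set, hP]; omega)
    have hrgA : PySem.List.pyGet? (List.range 26) ((la[i].toNat : Int) - 97) =
        some (la[i].toNat - 97) := by
      rw [hznA, PySem.List.pyGet?_natCast, List.getElem?_range (by omega)]
    have hrgB : PySem.List.pyGet? (List.range 26) ((lb[i].toNat : Int) - 97) =
        some (lb[i].toNat - 97) := by
      rw [hznB, PySem.List.pyGet?_natCast, List.getElem?_range (by omega)]
    have hgdA : la.getD i 'a' = la[i] := by simp [List.getD, List.getElem?_eq_getElem hila]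
    have hgdB : lb.getD i 'a' = lb[i] := by simp [List.getD, List.getElem?_eq_getElem hilt]
    simp only [aStep, hgb, hga, hsetB, hsetA, hrgA, hrgB, hgdA, hgdB]
    exact ⟨rfl, by simp [hP]⟩
  rw [pvFoldlSndInv (aStep la lb)
      (fun p i => ufStepP p ((la.getD i 'a').toNat - 97, (lb.getD i 'a').toNat - 97))
      (fun vis => vis.length = 26) _ hstep _ (by simp)]
  have hlenE : (Espec la lb).length = lb.length := by
    simp [Espec]; omega
  have hcongr : (List.range lb.length).foldl
      (fun p i => ufStepP p ((la.getD i 'a').toNat - 97, (lb.getD i 'a').toNat - 97))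
      (List.range 26) =
    (List.range (Espec la lb).length).foldl
      (fun p i => ufStepP p ((Espec la lb).getD i (0, 0))) (List.range 26) := by
    rw [hlenE]
    apply PySem.List.foldl_congr_mem
    intro p i hi
    have hilt : i < lb.length := List.mem_range.mp hi
    have hila : i < la.length := by omega
    have hE : (Espec la lb).getD i (0, 0) = (la[i].toNat - 97, lb[i].toNat - 97) := by
      have hiE : i < (Espec la lb).length := by omega
      simp only [List.getD, List.getElem?_eq_getElem hiE]
      simp [Espec, List.getElem_zip]
    rw [hE]
    simp [List.getD, List.getElem?_eq_getElem hila, List.getElem?_eq_getElem hilt]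
  rw [hcongr, pvFoldlRangeGetD]

-- A's output loop produces the singleton strings of the roots
theorem pvOutA : ∀ (l : List Char) (p : List Nat) (acc : List String), Wf p → lowerOKL l →
    (l.foldl aOut (p, acc)).2 =
      acc ++ l.map (fun c => String.ofList [Char.ofNat (97 + Root p (c.toNat - 97))]) := by
  intro l
  induction l with
  | nil => intro p acc _ _; simp
  | cons c t ih =>
    intro p acc hp hlo
    have hc := pvLowerMem hlo List.mem_cons_self
    have hk : c.toNat - 97 < 26 := by omega
    have hznC : ((c.toNat : Int) - 97) = ((c.toNat - 97 : Nat) : Int) := by omega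
    have hrg : PySem.List.pyGet? (List.range 26) ((c.toNat : Int) - 97) =
        some (c.toNat - 97) := by
      rw [hznC, PySem.List.pyGet?_natCast, List.getElem?_range hk]
    obtain ⟨hf2, hfwf, hfroots⟩ := pvUfFindSpec 26 p (c.toNat - 97) hp hk (by omega)
    rw [List.foldl_cons]
    have hbody : aOut (p, acc) c =
        ((ufFind 26 p (c.toNat - 97)).1,
          acc ++ [String.ofList [Char.ofNat (97 + Root p (c.toNat - 97))]]) := by
      simp only [aOut, hrg, hf2]
    rw [hbody, ih _ _ hfwf (pvLowerTail hlo)]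
    have hmap : t.map (fun c' => String.ofList [Char.ofNat (97 + Root (ufFind 26 p (c.toNat - 97)).1 (c'.toNat - 97))]) =
        t.map (fun c' => String.ofList [Char.ofNat (97 + Root p (c'.toNat - 97))]) := by
      apply List.map_congr_left
      intro x hx
      have hxc := pvLowerMem hlo (List.mem_cons_of_mem _ hx)
      rw [hfroots _ (by omega)]
    rw [hmap]
    simp

-- ===== VERDICT (by name: the statement is the Claim_ definition above) =====
theorem rownowazne_spec : Claim_equal_rownowazne := by
  intro A B C _ hpre
  obtain ⟨hlen, hA, hB, hC⟩ := hpre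
  unfold Spec_rownowazne
  show rownowazne A B C = rownowazne_alt A B C
  have hE : EdgesOK (Espec A.toList B.toList) := pvEspecOK hA hB
  have hufinv : UFInv (Espec A.toList B.toList)
      ((Espec A.toList B.toList).foldl ufStepP (List.range 26)) := by
    simpa using pvUFInvFold (Espec A.toList B.toList) [] (List.range 26) pvUFInvInit hE
  have hinit : LabInv (Espec A.toList B.toList) (List.range 26) := by
    refine ⟨by simp, fun x hx => ?_⟩
    have hgd : (List.range 26).getD x 0 = x := by
      simp [List.getD, List.getElem?_range hx]
    rw [hgd]
    exact ⟨le_refl x, Relation.ReflTransGen.refl⟩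
  obtain ⟨hinvF, hfixF⟩ := pvLabLoop 327 (Espec A.toList B.toList) (List.range 26) hE hinit
    (by norm_num [show (List.range 26).sum = 325 from rfl])
  have hagree : ∀ k, k < 26 →
      Root ((Espec A.toList B.toList).foldl ufStepP (List.range 26)) k =
        (labLoop 327 (Espec A.toList B.toList) (List.range 26)).getD k 0 := fun k hk =>
    pvMinClassUnique (hufinv.2 k hk) (pvLabMinClass hE hinvF (pvLabPassFix hfixF) k hk)
  simp only [rownowazne, rownowazne_alt]
  rw [pvLoopA hlen hA hB, pvOutA C.toList _ [] hufinv.1 hC, pvEdgesB hA hB]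
  simp only [List.nil_append]
  refine congrArg (PySem.Str.join "") (List.map_congr_left ?_)
  intro c hc
  have hcb := pvLowerMem hC hc
  have hk : c.toNat - 97 < 26 := by omega
  have hlabLt : (labLoop 327 (Espec A.toList B.toList) (List.range 26)).getD (c.toNat - 97) 0 < 26 :=
    lt_of_le_of_lt (hinvF.2 _ hk).1 hk
  rw [pvIdxChar c hcb.1 hcb.2]
  simp only [Option.getD_some]
  rw [pvLettersGetD _ hlabLt, hagree _ hk]
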